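-- pv_equiv track=rewrite | github.com/daniel-reich/ubiquitous-fiesta | tX5ZhY5EkduHAPZBh_4.py | nearest_element
-- ===== SOURCE A (Python) =====
-- def nearest_element(n, lst):
--   count=0
--   values_min=[]
--   values_diff=[]
--   for i in lst:
--     values_min.append(abs(n-i))
--   for i in values_min:
--     if i==min(values_min):
--       values_diff.append(lst[count])
--     count+=1
--   return(lst.index(max(values_diff)))
-- ===== SOURCE B (Python) =====
-- def nearest_element(n, lst):
--     return lst.index(max(lst, key=lambda x: (-abs(n - x), x)))
-- ===== Notes on version B (the rewrite author's own statement) =====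
-- stated objective: faster
-- what changed: Replaced A's multi-pass pipeline (build distance list, recompute min inside the loop, collect ties, max, index) by a single max() selection with the composite key (-abs(n-x), x) followed by one lst.index; Pre_ excludes only the empty list, on which both A and B raise ValueError.
import Mathlib
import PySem

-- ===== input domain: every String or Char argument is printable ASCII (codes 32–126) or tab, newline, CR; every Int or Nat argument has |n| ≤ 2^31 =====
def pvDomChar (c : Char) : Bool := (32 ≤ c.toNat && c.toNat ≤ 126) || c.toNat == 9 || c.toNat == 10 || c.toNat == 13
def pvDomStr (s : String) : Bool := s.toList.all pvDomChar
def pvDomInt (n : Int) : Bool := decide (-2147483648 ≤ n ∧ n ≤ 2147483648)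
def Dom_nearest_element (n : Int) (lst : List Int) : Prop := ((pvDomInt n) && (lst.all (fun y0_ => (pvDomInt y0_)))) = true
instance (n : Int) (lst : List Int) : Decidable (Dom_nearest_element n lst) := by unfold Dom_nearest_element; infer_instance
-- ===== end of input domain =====

-- B replaces A's multi-pass pipeline (distance list, min recomputed per iteration, tie list,
-- max, index) by one max() selection with composite key (-abs(n-x), x), then one lst.index.

-- ===== PORT A =====
def nearest_element (n : Int) (lst : List Int) : Int :=
  -- count=0; values_min=[]; for i in lst: values_min.append(abs(n-i))
  let values_min : List Int := lst.foldl (fun acc i => acc ++ [|n - i|]) []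
  -- for i in values_min: if i==min(values_min): values_diff.append(lst[count]); count+=1
  -- (count is always a valid index of lst, so Python's lst[count] never raises; .getD 0 is unreachable)
  let st : Int × List Int := values_min.foldl
    (fun st i =>
      if PySem.List.min? values_min (fun y => y) = some i then
        (st.1 + 1, st.2 ++ [(PySem.List.pyGet? lst st.1).getD 0])
      else (st.1 + 1, st.2)) ((0 : Int), ([] : List Int))
  -- return lst.index(max(values_diff))
  match PySem.List.max? st.2 (fun y => y) with
  | some v =>
    match PySem.List.index? lst v with
    | some k => (k : Int)
    | none => 0      -- unreachable: the chosen value is an element of lst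
  | none => 0        -- Python's max([]) raises ValueError; excluded by Pre_

-- ===== PORT B =====
def nearest_element_alt (n : Int) (lst : List Int) : Int :=
  -- return lst.index(max(lst, key=lambda x: (-abs(n - x), x)))
  match PySem.List.max2? lst (fun x => -|n - x|) (fun x => x) with
  | some v =>
    match PySem.List.index? lst v with
    | some k => (k : Int)
    | none => 0      -- unreachable: v ∈ lst
  | none => 0        -- Python's max([]) raises ValueError; excluded by Pre_

-- ===== PRECONDITION & SPEC =====
-- Pre_ excludes exactly the empty list, on which Python A raises ValueError (max of empty sequence).
def Pre_nearest_element (n : Int) (lst : List Int) : Prop := lst ≠ []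
instance (n : Int) (lst : List Int) : Decidable (Pre_nearest_element n lst) := by unfold Pre_nearest_element; infer_instance
def pvWitness_nearest_element : Int × List Int := (3, [1, 5, 2])

def Spec_nearest_element (n : Int) (lst : List Int) (out : Int) : Prop := out = nearest_element_alt n lst
instance (n : Int) (lst : List Int) (out : Int) : Decidable (Spec_nearest_element n lst out) := by unfold Spec_nearest_element; infer_instance

-- ===== CLAIM (what is proved, stated in full; the proofs are below) =====
def Claim_equal_nearest_element : Prop := ∀ (n : Int) (lst : List Int), Dom_nearest_element n lst → Pre_nearest_element n lst → Spec_nearest_element n lst (nearest_element n lst)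

-- ===== LEMMAS AND PROOFS =====

-- "a is at most b under the key (-|n-·|, ·) lexicographic order"
def lexle (n a b : Int) : Prop := |n - b| < |n - a| ∨ (|n - b| = |n - a| ∧ a ≤ b)

-- "v is THE best element of lst": member and lex-maximal under the key
def Best (n : Int) (lst : List Int) (v : Int) : Prop := v ∈ lst ∧ ∀ x ∈ lst, lexle n x v

theorem lexle_refl (n a : Int) : lexle n a a := Or.inr ⟨rfl, le_refl a⟩

theorem lexle_trans {n a b c : Int} (h1 : lexle n a b) (h2 : lexle n b c) : lexle n a c := by
  rcases h1 with h1 | ⟨h1, h1'⟩ <;> rcases h2 with h2 | ⟨h2, h2'⟩ <;>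
    [exact Or.inl (lt_trans h2 h1); exact Or.inl (h2 ▸ h1); exact Or.inl (h1 ▸ h2);
     exact Or.inr ⟨h2.trans h1, le_trans h1' h2'⟩]

theorem Best_unique {n : Int} {lst : List Int} {v w : Int} (hv : Best n lst v) (hw : Best n lst w) : v = w := by
  have h1 := hv.2 w hw.1
  have h2 := hw.2 v hv.1
  rcases h1 with h1 | ⟨h1, h1'⟩ <;> rcases h2 with h2 | ⟨h2, h2'⟩ <;> omega

-- the step of max2? with key (-|n-x|, x), written out
def bstep (n : Int) (acc : Option Int) (x : Int) : Option Int :=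
  match acc with
  | none => some x
  | some m =>
    if (decide ((-|n - m| : Int) < -|n - x|) || (!decide ((-|n - x| : Int) < -|n - m|) && decide (m < x))) = true
    then some x else some m

theorem max2?_eq_foldl_bstep (n : Int) (lst : List Int) :
    PySem.List.max2? lst (fun x => -|n - x|) (fun x => x) = lst.foldl (bstep n) none := by
  unfold PySem.List.max2? bstep
  congr 1
  funext acc x
  cases acc <;> rfl

theorem bstep_some (n m x : Int) :
    bstep n (some m) x
      = if |n - x| < |n - m| ∨ |n - x| ≤ |n - m| ∧ m < x then some x else some m := by
  simp [bstep]

theorem bstep_fold_best (n : Int) :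
    ∀ (l : List Int) (m : Int), ∃ v, l.foldl (bstep n) (some m) = some v ∧
      (v = m ∨ v ∈ l) ∧ lexle n m v ∧ ∀ x ∈ l, lexle n x v := by
  intro l
  induction l with
  | nil => exact fun m => ⟨m, rfl, Or.inl rfl, lexle_refl n m, by simp⟩
  | cons x t ih =>
    intro m
    by_cases hc : |n - x| < |n - m| ∨ |n - x| ≤ |n - m| ∧ m < x
    · -- m is replaced by x
      have hmx : lexle n m x := by
        rcases hc with h | ⟨h, h'⟩
        · exact Or.inl h
        · by_cases he : |n - x| = |n - m|
          · exact Or.inr ⟨he, le_of_lt h'⟩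
          · exact Or.inl (by omega)
      obtain ⟨v, hfold, hmem, hle, hall⟩ := ih x
      refine ⟨v, ?_, ?_, lexle_trans hmx hle, ?_⟩
      · rw [List.foldl_cons, bstep_some, if_pos hc]; exact hfold
      · rcases hmem with rfl | hv
        · exact Or.inr (List.mem_cons_self)
        · exact Or.inr (List.mem_cons_of_mem _ hv)
      · intro y hy
        rcases List.mem_cons.mp hy with rfl | hy
        · exact hle
        · exact hall y hy
    · -- m is kept; x is lex-≤ m
      have hxm : lexle n x m := by
        push Not at hc
        obtain ⟨h1, h2⟩ := hc
        by_cases he : |n - x| = |n - m|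
        · exact Or.inr ⟨he.symm, by have := h2 (by omega); omega⟩
        · exact Or.inl (by omega)
      obtain ⟨v, hfold, hmem, hle, hall⟩ := ih m
      refine ⟨v, ?_, ?_, hle, ?_⟩
      · rw [List.foldl_cons, bstep_some, if_neg hc]; exact hfold
      · rcases hmem with rfl | hv
        · exact Or.inl rfl
        · exact Or.inr (List.mem_cons_of_mem _ hv)
      · intro y hy
        rcases List.mem_cons.mp hy with rfl | hy
        · exact lexle_trans hxm hle
        · exact hall y hy

theorem alt_best (n : Int) (lst : List Int) (h : lst ≠ []) :
    ∃ v, PySem.List.max2? lst (fun x => -|n - x|) (fun x => x) = some v ∧ Best n lst v := by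
  obtain ⟨x, t, rfl⟩ := List.exists_cons_of_ne_nil h
  obtain ⟨v, hfold, hmem, hle, hall⟩ := bstep_fold_best n t x
  refine ⟨v, ?_, ?_, ?_⟩
  · rw [max2?_eq_foldl_bstep]; simpa [bstep] using hfold
  · rcases hmem with rfl | hv
    · exact List.mem_cons_self
    · exact List.mem_cons_of_mem _ hv
  · intro y hy
    rcases List.mem_cons.mp hy with rfl | hy
    · exact hle
    · exact hall y hy

-- A's counting fold over values_min collects exactly the elements of lst whose distance passes the test
theorem a_fold_filter (n : Int) (lst : List Int) (P : Int → Prop) [DecidablePred P] :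
    ∀ (suf pre acc : List Int), lst = pre ++ suf →
      (suf.map (fun i => |n - i|)).foldl
        (fun st i =>
          if P i then (st.1 + 1, st.2 ++ [(PySem.List.pyGet? lst st.1).getD 0])
          else (st.1 + 1, st.2)) (((pre.length : Int)), acc)
      = ((lst.length : Int), acc ++ suf.filter (fun x => decide (P (|n - x|)))) := by
  intro suf
  induction suf with
  | nil => intro pre acc hpre; simp [hpre]
  | cons x rest ih =>
    intro pre acc hpre
    have hget : PySem.List.pyGet? lst ((pre.length : Int)) = some x := by
      rw [hpre]; exact PySem.List.pyGet?_append_length pre rest x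
    have hlen : ((pre.length : Int)) + 1 = (((pre ++ [x]).length : Nat) : Int) := by
      simp
    by_cases hP : P (|n - x|)
    · simp only [List.map_cons, List.foldl_cons, if_pos hP, hget, Option.getD_some, hlen]
      rw [ih (pre ++ [x]) (acc ++ [x]) (by simp [hpre])]
      simp [hP]
    · simp only [List.map_cons, List.foldl_cons, if_neg hP, hlen]
      rw [ih (pre ++ [x]) acc (by simp [hpre])]
      simp [hP]

theorem a_best (n : Int) (lst : List Int) (h : lst ≠ []) :
    ∃ v, nearest_element n lst =
        (match PySem.List.index? lst v with
         | some k => (k : Int)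
         | none => 0) ∧ Best n lst v := by
  -- values_min is the distance map
  have hvm : lst.foldl (fun acc i => acc ++ [|n - i|]) ([] : List Int)
      = lst.map (fun i => |n - i|) := by
    simpa using PySem.List.foldl_append_singleton_eq_map (fun i => |n - i|) lst ([] : List Int)
  set vm : List Int := lst.map (fun i => |n - i|) with hvmdef
  -- the minimum distance
  have hvmne : vm ≠ [] := by simp [hvmdef, h]
  obtain ⟨m, hm⟩ : ∃ m, PySem.List.min? vm (fun y => y) = some m := by
    rcases hmo : PySem.List.min? vm (fun y => y) with _ | m
    · rw [PySem.List.min?_eq_none_iff] at hmo; exact absurd hmo hvmne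
    · exact ⟨m, rfl⟩
  have hmmem := PySem.List.min?_mem hm
  have hmmin := PySem.List.min?_isMin hm
  -- the collected tie list is a filter of lst
  have hfold := a_fold_filter n lst (fun i => PySem.List.min? vm (fun y => y) = some i)
    lst [] [] (by simp)
  set diff : List Int := lst.filter
    (fun x => decide (PySem.List.min? vm (fun y => y) = some (|n - x|))) with hdiffdef
  -- diff is nonempty: the minimum is attained
  obtain ⟨x0, hx0mem, hx0⟩ := List.mem_map.mp hmmem
  have hx0diff : x0 ∈ diff := by
    rw [hdiffdef, List.mem_filter]
    exact ⟨hx0mem, by simp [hx0, hm]⟩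
  obtain ⟨v, hv⟩ : ∃ v, PySem.List.max? diff (fun y => y) = some v := by
    rcases hvo : PySem.List.max? diff (fun y => y) with _ | v
    · rw [PySem.List.max?_eq_none_iff] at hvo; rw [hvo] at hx0diff; cases hx0diff
    · exact ⟨v, rfl⟩
  have hvmem := PySem.List.max?_mem hv
  have hvmax := PySem.List.max?_isMax hv
  have hvlst : v ∈ lst := (List.mem_filter.mp hvmem).1
  have hvmin : |n - v| = m := by
    have hvd := (List.mem_filter.mp hvmem).2
    have h1 : PySem.List.min? vm (fun y => y) = some (|n - v|) := of_decide_eq_true hvd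
    exact (Option.some.inj (hm.symm.trans h1)).symm
  refine ⟨v, ?_, hvlst, ?_⟩
  · -- the port computes exactly this
    simp only [nearest_element, hvm]
    have h0 : ((0 : Int), ([] : List Int)) = (((List.length ([] : List Int) : Nat) : Int), ([] : List Int)) := by simp
    rw [h0, hfold]
    simp only [List.nil_append]
    rw [hv]
  · -- v is lex-maximal
    intro x hx
    have hge : m ≤ |n - x| := hmmin _ (List.mem_map.mpr ⟨x, hx, rfl⟩)
    by_cases he : |n - x| = m
    · have hxdiff : x ∈ diff := by
        rw [hdiffdef, List.mem_filter]
        exact ⟨hx, by simp [he, hm]⟩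
      exact Or.inr ⟨by omega, hvmax x hxdiff⟩
    · exact Or.inl (by omega)

-- ===== VERDICT (by name: the statement is the Claim_ definition above) =====
theorem nearest_element_spec : Claim_equal_nearest_element := by
  intro n lst _ hpre
  unfold Spec_nearest_element
  obtain ⟨va, hva, hba⟩ := a_best n lst hpre
  obtain ⟨vb, hvb, hbb⟩ := alt_best n lst hpre
  have : va = vb := Best_unique hba hbb
  rw [hva, this]
  unfold nearest_element_alt
  rw [hvb]
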